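-- pv_equiv track=rewrite | github.com/mbswos/webOfScienceScrape | storecvs.py | get_name_from_cv_html_file
-- ===== SOURCE A (Python) =====
-- def get_name_from_cv_html_file(file_name):
-- 	raw_name = file_name[:-8]
-- 	names = raw_name.split('-')
-- 	new_names = []
-- 	for name in names:
-- 		new_names.append(name.split('_'))
-- 	last_name = '-'.join(new_names[len(new_names)-1])
-- 	first_name = new_names[0][0] if len(new_names) > 1 else None
-- 	middle_name = new_names[1][0] if len(new_names) == 3 else None
--
-- 	return first_name, middle_name, last_name
-- ===== SOURCE B (Python) =====
-- def _lead(s):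
--     # the run of characters before the first separator ('-' or '_')
--     out = []
--     for c in s:
--         if c == '-' or c == '_':
--             break
--         out.append(c)
--     return ''.join(out)
--
--
-- def get_name_from_cv_html_file(file_name):
--     raw = file_name[:-8]
--     # one scan: count the dashes and remember where the last one sits
--     dashes = 0
--     cut = -1
--     for i, c in enumerate(raw):
--         if c == '-':
--             dashes += 1
--             cut = i
--     last_name = ''.join('-' if c == '_' else c for c in raw[cut + 1:])
--     first_name = _lead(raw) if dashes > 0 else None
--     middle_name = _lead(raw[raw.index('-') + 1:]) if dashes == 2 else None
--     return first_name, middle_name, last_name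
-- ===== Notes on version B (the rewrite author's own statement) =====
-- stated objective: alternative
-- what changed: B never splits the name at all: a single enumerate scan counts the dashes and records the position of the last one, the last name is read off the tail after that position with underscores mapped to dashes, and first/middle names are taken by a prefix scan that stops at the first separator ('-' or '_'), instead of A's split-on-dash, per-segment split-on-underscore list-of-lists.
import Mathlib
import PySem

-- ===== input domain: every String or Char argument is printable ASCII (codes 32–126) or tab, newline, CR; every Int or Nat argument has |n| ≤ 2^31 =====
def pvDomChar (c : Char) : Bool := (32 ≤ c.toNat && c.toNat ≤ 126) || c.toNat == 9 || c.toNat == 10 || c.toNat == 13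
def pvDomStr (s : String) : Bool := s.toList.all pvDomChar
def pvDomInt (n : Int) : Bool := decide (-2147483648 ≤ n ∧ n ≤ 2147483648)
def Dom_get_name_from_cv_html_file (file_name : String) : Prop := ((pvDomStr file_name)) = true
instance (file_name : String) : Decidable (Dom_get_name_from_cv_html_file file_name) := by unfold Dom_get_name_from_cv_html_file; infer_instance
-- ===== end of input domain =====

-- B does not split the name at all: one counting scan finds the dash count and the last dash,
-- and prefix/suffix scans read the three parts off directly. Objective: alternative decomposition.

-- ===== PORT A =====
def get_name_from_cv_html_file (file_name : String) : Option String × Option String × String :=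
  let raw_name := PySem.Chars.slice file_name.toList none (some (-8))
  let names := PySem.Chars.splitOn raw_name ['-']
  let new_names := names.foldl (fun acc name => acc ++ [PySem.Chars.splitOn name ['_']]) []
  -- new_names[…] is always in range in the Python (split never returns an empty list);
  -- the .getD defaults are unreachable.
  let last_name := PySem.Chars.join ['-'] ((PySem.List.pyGet? new_names ((new_names.length : Int) - 1)).getD [])
  let first_name := if 1 < new_names.length
    then some (String.ofList ((PySem.List.pyGet? ((PySem.List.pyGet? new_names 0).getD []) 0).getD []))
    else none
  let middle_name := if new_names.length = 3
    then some (String.ofList ((PySem.List.pyGet? ((PySem.List.pyGet? new_names 1).getD []) 0).getD []))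
    else none
  (first_name, middle_name, String.ofList last_name)

-- ===== PORT B =====
-- helper _lead: the run of characters before the first separator ('-' or '_') — the Python
-- for-loop with a break, as structural recursion
def pvLead : List Char → List Char
  | [] => []
  | c :: rest => if c = '-' ∨ c = '_' then [] else c :: pvLead rest

def get_name_from_cv_html_file_alt (file_name : String) : Option String × Option String × String :=
  let raw := PySem.Chars.slice file_name.toList none (some (-8))
  -- one scan: count the dashes and remember where the last one sits
  let dc := (PySem.List.enumerate raw).foldl
      (fun (s : Int × Int) ic => if ic.2 = '-' then (s.1 + 1, ic.1) else s) (0, -1)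
  let dashes := dc.1
  let cut := dc.2
  let last_name := (PySem.List.slice raw (some (cut + 1)) none).map (fun c => if c = '_' then '-' else c)
  let first_name := if 0 < dashes then some (String.ofList (pvLead raw)) else none
  -- raw.index('-') is guarded by dashes == 2, so a '-' is present; the .getD default is unreachable
  let middle_name := if dashes = 2
    then some (String.ofList (pvLead
      (PySem.List.slice raw (some (((PySem.List.index? raw '-').getD 0 : Int) + 1)) none)))
    else none
  (first_name, middle_name, String.ofList last_name)

-- ===== PRECONDITION & SPEC =====
def Spec_get_name_from_cv_html_file (file_name : String) (out : Option String × Option String × String) : Prop := out = get_name_from_cv_html_file_alt file_name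
instance (file_name : String) (out : Option String × Option String × String) : Decidable (Spec_get_name_from_cv_html_file file_name out) := by unfold Spec_get_name_from_cv_html_file; infer_instance

-- ===== CLAIM (what is proved, stated in full; the proofs are below) =====
def Claim_equal_get_name_from_cv_html_file : Prop := ∀ (file_name : String), Dom_get_name_from_cv_html_file file_name → Spec_get_name_from_cv_html_file file_name (get_name_from_cv_html_file file_name)

-- ===== LEMMAS AND PROOFS =====

/-- Structural model of `splitOn` on a single-character separator. -/
def pvSplitC (sep : Char) : List Char → List (List Char)
  | [] => [[]]
  | c :: rest =>
    let r := pvSplitC sep rest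
    if c = sep then [] :: r else (c :: r.headD []) :: r.tail

theorem pvSplitC_ne_nil (sep : Char) (l : List Char) : pvSplitC sep l ≠ [] := by
  cases l with
  | nil => simp [pvSplitC]
  | cons c rest => simp only [pvSplitC]; split_ifs <;> simp

theorem pv_splitOn_go_acc (sep : List Char) :
    ∀ (fuel : Nat) (l cur : List Char) (acc : List (List Char)),
      PySem.Chars.splitOn.go sep fuel l cur acc
        = acc.reverse ++ PySem.Chars.splitOn.go sep fuel l cur [] := by
  intro fuel
  induction fuel with
  | zero => intro l cur acc; simp [PySem.Chars.splitOn.go]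
  | succ n ih =>
    intro l cur acc
    cases l with
    | nil => simp [PySem.Chars.splitOn.go]
    | cons c rest =>
      simp only [PySem.Chars.splitOn.go]
      split_ifs with h
      · rw [ih _ _ ([cur.reverse]), ih _ _ (cur.reverse :: acc)]
        simp
      · rw [ih rest (c :: cur) acc]

theorem pv_splitOn_go_eq (sep : Char) :
    ∀ (fuel : Nat) (l cur : List Char), l.length ≤ fuel →
      PySem.Chars.splitOn.go [sep] fuel l cur []
        = (cur.reverse ++ (pvSplitC sep l).headD []) :: (pvSplitC sep l).tail := by
  intro fuel
  induction fuel with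
  | zero =>
    intro l cur h
    have : l = [] := List.length_eq_zero_iff.mp (Nat.le_zero.mp h)
    subst this
    simp [PySem.Chars.splitOn.go, pvSplitC]
  | succ n ih =>
    intro l cur h
    cases l with
    | nil => simp [PySem.Chars.splitOn.go, pvSplitC]
    | cons c rest =>
      simp only [PySem.Chars.splitOn.go]
      split_ifs with hp
      · have hc : c = sep := by
          simp [List.isPrefixOf] at hp; exact hp.symm
        subst hc
        rw [pv_splitOn_go_acc [c] n _ _ [cur.reverse]]
        have hrec := ih (List.drop 1 (c :: rest)) [] (by simp at h ⊢; omega)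
        simp only [List.length_cons, List.length_nil, List.drop_succ_cons, List.drop_zero] at hrec ⊢
        rw [hrec]
        have hne := pvSplitC_ne_nil c rest
        simp only [pvSplitC]
        cases hsp : pvSplitC c rest with
        | nil => exact absurd hsp hne
        | cons p ps => simp
      · have hcne : c ≠ sep := by
          simp [List.isPrefixOf] at hp; exact fun hx => hp hx.symm
        rw [ih rest (c :: cur) (by simp at h; omega)]
        have hne := pvSplitC_ne_nil sep rest
        simp only [pvSplitC, if_neg hcne]
        cases hsp : pvSplitC sep rest with
        | nil => exact absurd hsp hne
        | cons p ps => simp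

theorem pv_splitOn_eq (sep : Char) (l : List Char) :
    PySem.Chars.splitOn l [sep] = pvSplitC sep l := by
  simp only [PySem.Chars.splitOn]
  rw [pv_splitOn_go_eq sep (l.length + 1) l [] (by omega)]
  have hne := pvSplitC_ne_nil sep l
  cases hsp : pvSplitC sep l with
  | nil => exact absurd hsp hne
  | cons p ps => simp

theorem pv_length_pvSplitC (sep : Char) (l : List Char) :
    (pvSplitC sep l).length = l.count sep + 1 := by
  induction l with
  | nil => simp [pvSplitC]
  | cons c rest ih =>
    simp only [pvSplitC]
    have hne := pvSplitC_ne_nil sep rest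
    by_cases hc : c = sep
    · subst hc; simp [ih]
    · rw [if_neg hc]
      cases hsp : pvSplitC sep rest with
      | nil => exact absurd hsp hne
      | cons p ps =>
        rw [hsp] at ih
        simp only [List.length_cons, List.tail_cons] at ih ⊢
        simp [hc, ih]

theorem pv_headD_pvSplitC (sep : Char) (l : List Char) :
    (pvSplitC sep l).headD [] = l.takeWhile (fun c => c != sep) := by
  induction l with
  | nil => simp [pvSplitC]
  | cons c rest ih =>
    simp only [pvSplitC]
    by_cases hc : c = sep
    · subst hc; simp
    · rw [if_neg hc, List.headD_cons, List.takeWhile_cons_of_pos (by simp [hc])]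
      rw [ih]

theorem pv_pvSplitC_append (sep : Char) (a b : List Char) (ha : sep ∉ a) :
    pvSplitC sep (a ++ sep :: b) = a :: pvSplitC sep b := by
  induction a with
  | nil => simp [pvSplitC]
  | cons x a' ih =>
    have hx : x ≠ sep := fun h => ha (by simp [h])
    have ih' := ih (fun h => ha (List.mem_cons_of_mem _ h))
    simp only [List.cons_append, pvSplitC, ih', if_neg hx, List.headD_cons, List.tail_cons]

theorem pv_getLastD_pvSplitC (sep : Char) (l : List Char) :
    (pvSplitC sep l).getLastD [] = (l.reverse.takeWhile (fun c => c != sep)).reverse := by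
  induction l with
  | nil => simp [pvSplitC]
  | cons c rest ih =>
    have hne := pvSplitC_ne_nil sep rest
    simp only [pvSplitC, List.reverse_cons, List.takeWhile_append]
    by_cases hc : c = sep
    · rw [if_pos hc, List.getLastD_cons, ih]
      have hsep : List.takeWhile (fun x => x != sep) [c] = [] := by
        simp [hc]
      by_cases hall : (rest.reverse.takeWhile (fun x => x != sep)).length = rest.reverse.length
      · rw [if_pos hall, hsep, List.append_nil,
            (List.takeWhile_prefix _).eq_of_length hall]
      · rw [if_neg hall]
    · rw [if_neg hc]
      have hone : List.takeWhile (fun x => x != sep) [c] = [c] := by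
        simp [hc]
      cases hsp : pvSplitC sep rest with
      | nil => exact absurd hsp hne
      | cons p ps =>
        cases ps with
        | nil =>
          have hcount : rest.count sep = 0 := by
            have hlen := pv_length_pvSplitC sep rest
            rw [hsp] at hlen; simp at hlen; omega
          have hmem : sep ∉ rest := List.count_eq_zero.mp hcount
          have hall : rest.reverse.takeWhile (fun x => x != sep) = rest.reverse :=
            List.takeWhile_eq_self_iff.mpr (by
              intro x hx
              have hxr : x ∈ rest := List.mem_reverse.mp hx
              simp only [bne_iff_ne, ne_eq]
              exact fun h => hmem (h ▸ hxr))
          have hp : p = rest := by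
            have hh := pv_headD_pvSplitC sep rest
            rw [hsp] at hh
            simp only [List.headD_cons] at hh
            have hself : List.takeWhile (fun x => x != sep) rest = rest :=
              List.takeWhile_eq_self_iff.mpr (by
                intro x hx
                simp only [bne_iff_ne, ne_eq]
                exact fun h => hmem (h ▸ hx))
            rw [hh, hself]
          rw [if_pos (by rw [hall]), hone]
          simp [hp]
        | cons q qs =>
          have hcount : 0 < rest.count sep := by
            have hlen := pv_length_pvSplitC sep rest
            rw [hsp] at hlen; simp at hlen; omega
          have hmem : sep ∈ rest := List.count_pos_iff.mp hcount
          have hnall : (rest.reverse.takeWhile (fun x => x != sep)).length ≠ rest.reverse.length := by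
            intro hlen
            have heq := (List.takeWhile_prefix (l := rest.reverse) (fun x => x != sep)).eq_of_length hlen
            have hx := List.takeWhile_eq_self_iff.mp heq sep (List.mem_reverse.mpr hmem)
            simp at hx
          rw [if_neg hnall]
          simp only [List.headD_cons, List.tail_cons, List.getLastD_cons]
          rw [hsp, List.getLastD_cons, List.getLastD_cons] at ih
          exact ih

theorem pv_join_pvSplitC (l : List Char) :
    PySem.Chars.join ['-'] (pvSplitC '_' l) = l.map (fun c => if c = '_' then '-' else c) := by
  induction l with
  | nil => simp [pvSplitC, PySem.Chars.join_singleton]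
  | cons c rest ih =>
    have hne := pvSplitC_ne_nil '_' rest
    cases hsp : pvSplitC '_' rest with
    | nil => exact absurd hsp hne
    | cons p ps =>
      rw [hsp] at ih
      simp only [pvSplitC, hsp]
      by_cases hc : c = '_'
      · rw [if_pos hc, PySem.Chars.join_cons_cons, ih]
        simp [hc]
      · rw [if_neg hc]
        simp only [List.headD_cons, List.tail_cons]
        have hstep : PySem.Chars.join ['-'] ((c :: p) :: ps)
            = c :: PySem.Chars.join ['-'] (p :: ps) := by
          cases ps with
          | nil => simp [PySem.Chars.join_singleton]
          | cons q qs => rw [PySem.Chars.join_cons_cons, PySem.Chars.join_cons_cons]; simp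
        rw [hstep, ih]
        simp [hc]

theorem pv_pvLead_eq (l : List Char) :
    pvLead l = (l.takeWhile (fun c => c != '-')).takeWhile (fun c => c != '_') := by
  induction l with
  | nil => simp [pvLead]
  | cons c rest ih =>
    by_cases hd : c = '-'
    · simp [pvLead, hd]
    · by_cases hu : c = '_'
      · simp [pvLead, hu]
      · simp only [pvLead, if_neg (not_or.mpr ⟨hd, hu⟩), ih]
        rw [List.takeWhile_cons_of_pos (by exact bne_iff_ne.mpr hd),
            List.takeWhile_cons_of_pos (by exact bne_iff_ne.mpr hu)]

theorem pv_fold_enum (l : List Char) :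
    (PySem.List.enumerate l).foldl
        (fun (s : Int × Int) ic => if ic.2 = '-' then (s.1 + 1, ic.1) else s) (0, -1)
      = ((l.count '-' : Int),
         (l.length : Int) - 1 - ((l.reverse.takeWhile (fun c => c != '-')).length : Int)) := by
  induction l using List.reverseRecOn with
  | nil => simp [PySem.List.enumerate]
  | append_singleton xs x ih =>
    rw [PySem.List.enumerate_append, List.foldl_append, ih]
    by_cases hx : x = '-'
    · simp only [PySem.List.enumerate, List.foldl_cons, List.foldl_nil, hx]
      simp [List.count_append]
    · simp only [PySem.List.enumerate, List.foldl_cons, List.foldl_nil, if_neg (by simpa using hx)]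
      rw [List.reverse_append]
      simp only [List.reverse_singleton, List.singleton_append]
      simp [List.count_append, hx, Prod.ext_iff]
      omega

theorem pv_pyGet_zero {α : Type} (xs : List α) : PySem.List.pyGet? xs 0 = xs[0]? := by
  simpa using PySem.List.pyGet?_natCast xs 0

theorem pv_pyGet_one {α : Type} (xs : List α) : PySem.List.pyGet? xs 1 = xs[1]? := by
  simpa using PySem.List.pyGet?_natCast xs 1

theorem pv_pyGet_len_sub_one {α : Type} (xs : List α) (h : 0 < xs.length) :
    PySem.List.pyGet? xs ((xs.length : Int) - 1) = xs[xs.length - 1]? := by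
  have hc : ((xs.length : Int) - 1) = ((xs.length - 1 : Nat) : Int) := by omega
  rw [hc, PySem.List.pyGet?_natCast]

theorem pv_A_first (raw : List Char) :
    (PySem.List.pyGet? ((PySem.List.pyGet?
        ((pvSplitC '-' raw).map (fun name => pvSplitC '_' name)) 0).getD []) 0).getD []
      = pvLead raw := by
  have hne := pvSplitC_ne_nil '-' raw
  cases hsp : pvSplitC '-' raw with
  | nil => exact absurd hsp hne
  | cons p ps =>
    have hp : p = raw.takeWhile (fun c => c != '-') := by
      have h := pv_headD_pvSplitC '-' raw; rw [hsp] at h; simpa using h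
    simp only [List.map_cons, pv_pyGet_zero, List.getElem?_cons_zero, Option.getD_some]
    have hne2 := pvSplitC_ne_nil '_' p
    cases hq : pvSplitC '_' p with
    | nil => exact absurd hq hne2
    | cons q qs =>
      have hq0 : q = p.takeWhile (fun c => c != '_') := by
        have h := pv_headD_pvSplitC '_' p; rw [hq] at h; simpa using h
      simp only [List.getElem?_cons_zero, Option.getD_some]
      rw [hq0, hp, pv_pvLead_eq]

theorem pv_A_middle (raw a b : List Char) (hraw : raw = a ++ '-' :: b) (hna : '-' ∉ a) :
    (PySem.List.pyGet? ((PySem.List.pyGet?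
        ((pvSplitC '-' raw).map (fun name => pvSplitC '_' name)) 1).getD []) 0).getD []
      = pvLead b := by
  subst hraw
  rw [pv_pvSplitC_append '-' a b hna]
  have hne := pvSplitC_ne_nil '-' b
  cases hsp : pvSplitC '-' b with
  | nil => exact absurd hsp hne
  | cons r rs =>
    have hr : r = b.takeWhile (fun c => c != '-') := by
      have h := pv_headD_pvSplitC '-' b; rw [hsp] at h; simpa using h
    simp only [List.map_cons, pv_pyGet_one, List.getElem?_cons_succ, List.getElem?_cons_zero,
      Option.getD_some]
    have hne2 := pvSplitC_ne_nil '_' r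
    cases hq : pvSplitC '_' r with
    | nil => exact absurd hq hne2
    | cons q qs =>
      have hq0 : q = r.takeWhile (fun c => c != '_') := by
        have h := pv_headD_pvSplitC '_' r; rw [hq] at h; simpa using h
      simp only [pv_pyGet_zero, List.getElem?_cons_zero, Option.getD_some]
      rw [hq0, hr, pv_pvLead_eq]

theorem pv_A_last (raw : List Char) :
    PySem.Chars.join ['-'] ((PySem.List.pyGet?
        ((pvSplitC '-' raw).map (fun name => pvSplitC '_' name))
        ((((pvSplitC '-' raw).map (fun name => pvSplitC '_' name)).length : Int) - 1)).getD [])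
      = ((raw.reverse.takeWhile (fun c => c != '-')).reverse).map
          (fun c => if c = '_' then '-' else c) := by
  have hlen : 0 < ((pvSplitC '-' raw).map (fun name => pvSplitC '_' name)).length := by
    rw [List.length_map, pv_length_pvSplitC]; omega
  rw [pv_pyGet_len_sub_one _ hlen, ← List.getLast?_eq_getElem?, List.getLast?_map]
  have hne := pvSplitC_ne_nil '-' raw
  have hsome : (pvSplitC '-' raw).getLast? = some ((pvSplitC '-' raw).getLastD []) := by
    cases hsp : pvSplitC '-' raw with
    | nil => exact absurd hsp hne
    | cons p ps =>
      rw [List.getLastD_eq_getLast?]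
      cases h : (p :: ps).getLast? with
      | none => simp at h
      | some x => rfl
  rw [hsome, pv_getLastD_pvSplitC, Option.map_some, Option.getD_some, pv_join_pvSplitC]

-- ===== VERDICT (by name: the statement is the Claim_ definition above) =====
theorem get_name_from_cv_html_file_spec : Claim_equal_get_name_from_cv_html_file := by
  intro s _
  unfold Spec_get_name_from_cv_html_file get_name_from_cv_html_file get_name_from_cv_html_file_alt
  generalize PySem.Chars.slice s.toList none (some (-8)) = raw
  simp only [pv_splitOn_eq, PySem.List.foldl_append_singleton_eq_map, List.nil_append,
    pv_fold_enum]
  have hlenm : (List.map (fun name => pvSplitC '_' name) (pvSplitC '-' raw)).length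
      = raw.count '-' + 1 := by
    rw [List.length_map, pv_length_pvSplitC]
  simp only [Prod.mk.injEq]
  refine ⟨?_, ?_, ?_⟩
  · -- first_name
    by_cases h1 : 0 < raw.count '-'
    · rw [if_pos (by rw [hlenm]; omega), if_pos (by exact_mod_cast h1), pv_A_first]
    · rw [if_neg (by rw [hlenm]; omega), if_neg (by exact_mod_cast h1)]
  · -- middle_name
    by_cases h2 : raw.count '-' = 2
    · have hmem : '-' ∈ raw := List.count_pos_iff.mp (by omega)
      have hdne : raw.dropWhile (fun c => c != '-') ≠ [] := by
        intro h0
        have hself : raw.takeWhile (fun c => c != '-') = raw := by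
          have h := List.takeWhile_append_dropWhile (p := fun c => c != '-') (l := raw)
          rw [h0, List.append_nil] at h; exact h
        have := List.takeWhile_eq_self_iff.mp hself '-' hmem
        simp at this
      have hb : raw.dropWhile (fun c => c != '-')
          = '-' :: (raw.dropWhile (fun c => c != '-')).tail := by
        have hh := List.head_dropWhile_not (fun c => c != '-') hdne
        have hct := List.cons_head_tail hdne
        rw [← hct]
        congr 1
        simpa using hh
      obtain ⟨a, b, hraw, hna⟩ :
          ∃ a b, raw = a ++ '-' :: b ∧ '-' ∉ a := by
        refine ⟨raw.takeWhile (fun c => c != '-'), (raw.dropWhile (fun c => c != '-')).tail,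
          ?_, ?_⟩
        · conv_lhs => rw [← List.takeWhile_append_dropWhile (p := fun c => c != '-') (l := raw)]
          rw [← hb]
        · intro hx
          have := List.mem_takeWhile_imp hx
          simp at this
      have hidx : PySem.List.index? raw '-' = some a.length := by
        rw [PySem.List.index?_eq_some_iff]
        exact ⟨a, b, hraw, rfl, hna⟩
      rw [if_pos (by rw [hlenm]; omega), if_pos (by exact_mod_cast h2),
        pv_A_middle raw a b hraw hna, hidx]
      simp only [Option.getD_some]
      rw [show ((a.length : Int) + 1) = ((a.length + 1 : Nat) : Int) by push_cast; ring,
        PySem.List.slice_from_natCast]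
      have hdropb : raw.drop (a.length + 1) = b := by
        rw [hraw, show a ++ '-' :: b = (a ++ ['-']) ++ b by simp,
          show a.length + 1 = (a ++ ['-']).length by simp, List.drop_left]
      rw [hdropb]
    · rw [if_neg (by rw [hlenm]; omega), if_neg (by exact_mod_cast h2)]
  · -- last_name
    rw [pv_A_last]
    have htw : (raw.reverse.takeWhile (fun c => c != '-')).length ≤ raw.length := by
      simpa using (List.takeWhile_prefix (l := raw.reverse) (fun c => c != '-')).length_le
    rw [show ((raw.length : Int) - 1
          - ((raw.reverse.takeWhile (fun c => c != '-')).length : Int) + 1)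
        = ((raw.length - (raw.reverse.takeWhile (fun c => c != '-')).length : Nat) : Int) by
        push_cast [htw]; ring,
      PySem.List.slice_from_natCast]
    have htk : raw.reverse.takeWhile (fun c => c != '-')
        = raw.reverse.take (raw.reverse.takeWhile (fun c => c != '-')).length :=
      List.prefix_iff_eq_take.mp (List.takeWhile_prefix _)
    have hdrop : raw.drop (raw.length - (raw.reverse.takeWhile (fun c => c != '-')).length)
        = (raw.reverse.takeWhile (fun c => c != '-')).reverse := by
      conv_rhs => rw [htk]
      rw [List.reverse_take]
      simp
    rw [hdrop]
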